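-- pv_equiv track=rewrite | github.com/samyhaff/python_projects | 3d.py | ContourD1
-- ===== SOURCE A (Python) =====
-- def ContourD1(Plan,Couleur):
--     l1=len(Plan[0])
--     l2=len(Plan)
--     for i in range(l1):
--         Plan[0][i]=Couleur
--         Plan[l2-1][i]=Couleur
--     for j in range(l2):
--         Plan[j][0]=Couleur
--         Plan[j][l1-1]=Couleur
--     return Plan
-- ===== SOURCE B (Python) =====
-- def ContourD1(Plan, Couleur):
--     l1 = len(Plan[0])
--     l2 = len(Plan)
--     for j in range(l2):
--         row = Plan[j]
--         if j == 0 or j == l2 - 1: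
--             for i in range(l1):
--                 row[i] = Couleur
--         else:
--             row[0] = Couleur
--             row[l1 - 1] = Couleur
--     return Plan
-- ===== Notes on version B (the rewrite author's own statement) =====
-- stated objective: alternative
-- what changed: Replaces A's two separate passes (column loop writing top and bottom rows, then row loop writing left and right cells) by a single row-wise pass that fills the whole first/last row and only the two end cells of interior rows.
import Mathlib
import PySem

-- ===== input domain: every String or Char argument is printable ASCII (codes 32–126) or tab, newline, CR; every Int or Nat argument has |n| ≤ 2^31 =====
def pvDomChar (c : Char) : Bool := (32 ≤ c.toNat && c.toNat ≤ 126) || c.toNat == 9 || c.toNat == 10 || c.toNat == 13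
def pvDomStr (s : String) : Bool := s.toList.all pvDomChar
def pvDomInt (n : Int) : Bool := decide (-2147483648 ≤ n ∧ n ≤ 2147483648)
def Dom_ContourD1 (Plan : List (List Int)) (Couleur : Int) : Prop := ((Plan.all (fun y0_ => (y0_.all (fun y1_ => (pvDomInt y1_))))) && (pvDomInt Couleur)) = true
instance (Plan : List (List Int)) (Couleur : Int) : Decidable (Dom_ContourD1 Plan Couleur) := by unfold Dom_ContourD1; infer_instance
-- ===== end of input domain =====

-- B replaces A's two passes (column loop over the top and bottom rows, then row loop over
-- the left/right cells) by a single row-wise pass: full fill for the first/last row, end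
-- cells only for interior rows.  Both mutate Plan in place in Python; the equivalence
-- proved here is about the return value.

-- ===== PORT A =====
-- Plan[j][i] = c  (modify/set are no-ops out of range; Pre_ keeps all indices in range)
def pvSetRow (P : List (List Int)) (j i : Nat) (c : Int) : List (List Int) :=
  P.modify j (fun r => r.set i c)

def ContourD1 (Plan : List (List Int)) (Couleur : Int) : List (List Int) :=
  let l1 := (Plan.headD []).length
  let l2 := Plan.length
  let P1 := (List.range l1).foldl
    (fun P i => pvSetRow (pvSetRow P 0 i Couleur) (l2 - 1) i Couleur) Plan
  (List.range l2).foldl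
    (fun P j => pvSetRow (pvSetRow P j 0 Couleur) j (l1 - 1) Couleur) P1

-- ===== PORT B =====
-- the inner loop 'for i in range(l1): row[i] = Couleur'
def pvFillRow (r : List Int) (n : Nat) (c : Int) : List Int :=
  (List.range n).foldl (fun r i => r.set i c) r

def ContourD1_alt (Plan : List (List Int)) (Couleur : Int) : List (List Int) :=
  let l1 := (Plan.headD []).length
  let l2 := Plan.length
  Plan.mapIdx (fun j r =>
    if j = 0 ∨ j = l2 - 1 then pvFillRow r l1 Couleur
    else PySem.List.pySetD (PySem.List.pySetD r 0 Couleur) ((l1 : Int) - 1) Couleur)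

-- ===== PRECONDITION & SPEC =====
-- exactly the inputs on which A returns (no IndexError): a nonempty grid whose first row
-- is nonempty and whose every row is at least as long as the first row
def Pre_ContourD1 (Plan : List (List Int)) (Couleur : Int) : Prop :=
  Plan ≠ [] ∧ 1 ≤ (Plan.headD []).length ∧ ∀ r ∈ Plan, (Plan.headD []).length ≤ r.length
instance (Plan : List (List Int)) (Couleur : Int) : Decidable (Pre_ContourD1 Plan Couleur) := by
  unfold Pre_ContourD1; infer_instance
def pvWitness_ContourD1 : List (List Int) × Int := ([[1, 2], [3, 4], [5, 6]], 9)

def Spec_ContourD1 (Plan : List (List Int)) (Couleur : Int) (out : List (List Int)) : Prop := out = ContourD1_alt Plan Couleur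
instance (Plan : List (List Int)) (Couleur : Int) (out : List (List Int)) : Decidable (Spec_ContourD1 Plan Couleur out) := by unfold Spec_ContourD1; infer_instance

-- ===== CLAIM (what is proved, stated in full; the proofs are below) =====
def Claim_equal_ContourD1 : Prop := ∀ (Plan : List (List Int)) (Couleur : Int), Dom_ContourD1 Plan Couleur → Pre_ContourD1 Plan Couleur → Spec_ContourD1 Plan Couleur (ContourD1 Plan Couleur)

-- ===== LEMMAS AND PROOFS =====

theorem pvFillRow_succ (r : List Int) (n : Nat) (c : Int) :
    pvFillRow r (n + 1) c = (pvFillRow r n c).set n c := by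
  simp [pvFillRow, List.range_succ]

theorem pvFillRow_length (r : List Int) (n : Nat) (c : Int) :
    (pvFillRow r n c).length = r.length := by
  induction n with
  | zero => simp [pvFillRow]
  | succ n ih => simp [pvFillRow_succ, ih]

theorem pvFillRow_get (r : List Int) (n : Nat) (c : Int) (j : Nat) :
    (pvFillRow r n c)[j]? = if j < n ∧ j < r.length then some c else r[j]? := by
  induction n with
  | zero => simp [pvFillRow]
  | succ n ih =>
    rw [pvFillRow_succ, List.getElem?_set, pvFillRow_length, ih]
    by_cases h1 : n = j
    · subst h1
      by_cases h2 : n < r.length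
      · simp [h2]
      · simp [h2]
    · by_cases h3 : j < n ∧ j < r.length
      · rw [if_neg h1, if_pos h3, if_pos (by omega)]
      · rw [if_neg h1, if_neg h3, if_neg (by omega)]

-- setting an already-filled cell to the same colour changes nothing
theorem pvFillRow_set (r : List Int) (n : Nat) (c : Int) (i : Nat)
    (hi : i < n) (hr : i < r.length) :
    (pvFillRow r n c).set i c = pvFillRow r n c := by
  apply List.ext_getElem?
  intro j
  rw [List.getElem?_set, pvFillRow_length, pvFillRow_get]
  by_cases h : i = j
  · subst h; simp [hr, hi]
  · simp [h]

-- first loop of A: rows 0 and l2-1 become pvFillRow, every other row is untouched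
theorem loop1_get (Plan : List (List Int)) (c : Int) (l2 : Nat) (n j : Nat) :
    ((List.range n).foldl
        (fun P i => pvSetRow (pvSetRow P 0 i c) (l2 - 1) i c) Plan)[j]?
    = if j = 0 ∨ j = l2 - 1 then (Plan[j]?).map (fun r => pvFillRow r n c)
      else Plan[j]? := by
  induction n with
  | zero =>
    cases h : Plan[j]? <;> simp [pvFillRow, h]
  | succ n ih =>
    rw [List.range_succ, List.foldl_append, List.foldl_cons, List.foldl_nil,
      pvSetRow, pvSetRow, List.getElem?_modify, List.getElem?_modify, ih]
    by_cases h0 : j = 0 <;> by_cases h1 : j = l2 - 1 <;>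
      cases h : Plan[j]? <;>
        simp [h0, h1, pvFillRow_succ, List.set_set]
    all_goals first
      | (split <;> simp [List.set_set])
      | (rw [if_neg (by omega), if_neg (by omega)])

-- second loop of A: every row j < n gets its two end cells set
theorem loop2_get (Q : List (List Int)) (c : Int) (m : Nat) (n j : Nat) :
    ((List.range n).foldl
        (fun P j' => pvSetRow (pvSetRow P j' 0 c) j' m c) Q)[j]?
    = if j < n then (Q[j]?).map (fun r => (r.set 0 c).set m c) else Q[j]? := by
  induction n with
  | zero => simp
  | succ n ih =>
    rw [List.range_succ, List.foldl_append, List.foldl_cons, List.foldl_nil,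
      pvSetRow, pvSetRow, List.getElem?_modify, List.getElem?_modify, ih]
    by_cases hn : n = j
    · subst hn
      cases h : Q[n]? <;> simp
    · by_cases hj : j < n
      · cases h : Q[j]? <;> simp [hn, hj, Nat.lt_succ_of_lt hj]
      · have h2 : ¬ j < n + 1 := by omega
        cases h : Q[j]? <;> simp [hn, hj, h2]

-- ===== VERDICT (by name: the statement is the Claim_ definition above) =====
theorem ContourD1_spec : Claim_equal_ContourD1 := by
  intro Plan Couleur _ hPre
  obtain ⟨hne, hl1, hrows⟩ := hPre
  unfold Spec_ContourD1 ContourD1 ContourD1_alt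
  apply List.ext_getElem?
  intro j
  set l1 := (Plan.headD []).length with hl1def
  set l2 := Plan.length with hl2def
  rw [loop2_get, List.getElem?_mapIdx]
  by_cases hj : j < l2
  · -- row j exists
    have hjlt : j < Plan.length := hj
    have hr : Plan[j]? = some (Plan[j]'hjlt) := List.getElem?_eq_getElem hjlt
    set r := Plan[j]'hjlt with hrdef
    have hrmem : r ∈ Plan := List.getElem_mem hjlt
    have hrlen : l1 ≤ r.length := hrows r hrmem
    rw [loop1_get, hr]
    by_cases hb : j = 0 ∨ j = l2 - 1
    · simp only [if_pos hj, if_pos hb, Option.map_some]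
      congr 1
      rw [pvFillRow_set r l1 Couleur 0 (by omega) (by omega),
        pvFillRow_set r l1 Couleur (l1 - 1) (by omega) (by omega)]
    · have e0 : PySem.List.pySetD r (0 : Int) Couleur = r.set 0 Couleur := by
        rw [PySem.List.pySetD_of_nonneg r Couleur (by norm_num)]; norm_num
      have e1 : PySem.List.pySetD (r.set 0 Couleur) ((l1 : Int) - 1) Couleur
          = (r.set 0 Couleur).set (l1 - 1) Couleur := by
        rw [PySem.List.pySetD_of_nonneg (r.set 0 Couleur) Couleur (by omega)]
        congr 1; omega
      simp [hb, hj, e0, e1]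
  · -- out of range: both none
    have h1 : Plan[j]? = none := List.getElem?_eq_none (by omega)
    rw [loop1_get, h1]
    simp [hj]
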